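-- pv_equiv track=rewrite | github.com/Handonggon/coding_test | programmers/챌린지/코딩테스트 실전 대비 모의고사(2022)/2차(7.27~8.23)/잉규/2번.py | solution
-- ===== SOURCE A (Python) =====
-- def solution(topping):
--     dic_topping = {}
--     set_topping = set()
--     count = 0
--     for i in topping :
--         if i not in dic_topping.keys() :
--             dic_topping[i] = 1
--         else :
--             dic_topping[i] += 1
--
--     for i in topping :
--         set_topping.add(i)
--         dic_topping[i] -= 1
--         if dic_topping[i] == 0 :
--             dic_topping.pop(i)
--         if len(set_topping) == len(dic_topping) :
--             count += 1
--
--     return count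
-- ===== SOURCE B (Python) =====
-- def solution(topping):
--     # forward pass: left[i] = number of distinct toppings in topping[:i+1]
--     left = []
--     seen = set()
--     for x in topping:
--         seen.add(x)
--         left.append(len(seen))
--     # reverse pass: right[i] = number of distinct toppings in topping[i+1:]
--     right = []
--     seen = set()
--     for x in reversed(topping):
--         right.append(len(seen))
--         seen.add(x)
--     right.reverse()
--     return sum(1 for a, b in zip(left, right) if a == b)
-- ===== Notes on version B (the rewrite author's own statement) =====
-- stated objective: alternative
-- what changed: Replaces A's single pass that live-maintains a seen-set together with a multiset counter dict (decrement and pop) by two pure array-building passes: a forward pass recording prefix distinct counts, a reverse pass recording suffix distinct counts, then a zip/count of equal positions.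
import Mathlib
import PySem

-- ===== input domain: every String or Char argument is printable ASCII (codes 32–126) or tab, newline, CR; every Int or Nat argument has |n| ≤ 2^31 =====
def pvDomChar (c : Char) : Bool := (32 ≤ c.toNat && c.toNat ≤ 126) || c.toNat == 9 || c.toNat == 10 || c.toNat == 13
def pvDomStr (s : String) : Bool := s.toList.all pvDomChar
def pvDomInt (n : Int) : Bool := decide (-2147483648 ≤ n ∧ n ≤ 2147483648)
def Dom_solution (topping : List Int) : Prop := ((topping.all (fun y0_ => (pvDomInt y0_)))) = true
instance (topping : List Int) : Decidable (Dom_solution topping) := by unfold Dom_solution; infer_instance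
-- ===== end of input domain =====

-- B replaces A's single pass over a live seen-set plus a decrement-and-pop counter dict by two
-- pure passes building prefix/suffix distinct-count lists and a final zip-count (objective: alternative).

-- ===== PORT A =====
-- A-side helper: the body of A's second for-loop (state = (set_topping, dic_topping, count)).
-- A's `dic_topping[i] -= 1` is ported with Dict.modify; this is exact because after the first
-- loop every element of topping is a key of the dict, so Python never raises KeyError here
-- (likewise `dic_topping.pop(i)` always finds its key).
def stepA (st : PySem.Set Int × PySem.Dict Int Int × Int) (i : Int) :
    PySem.Set Int × PySem.Dict Int Int × Int :=
  let s := PySem.Set.add st.1 i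
  let d := st.2.1.modify i 0 (· - 1)
  let d := if d.getD i 0 == 0 then d.erase i else d
  let c := if PySem.Set.len s == (d.size : Int) then st.2.2 + 1 else st.2.2
  (s, d, c)

def solution (topping : List Int) : Int :=
  let dic0 : PySem.Dict Int Int :=
    topping.foldl (fun dic i =>
      if (PySem.Dict.contains dic i) = false then dic.insert i 1
      else dic.modify i 0 (· + 1)) PySem.Dict.empty
  let fin := topping.foldl stepA (PySem.Set.ofList [], dic0, 0)
  fin.2.2

-- ===== PORT B =====
def solution_alt (topping : List Int) : Int :=
  let fwd := topping.foldl (fun (st : PySem.Set Int × List Int) x =>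
      let s := PySem.Set.add st.1 x
      (s, st.2 ++ [PySem.Set.len s])) (PySem.Set.ofList [], [])
  let bwd := topping.reverse.foldl (fun (st : PySem.Set Int × List Int) x =>
      (PySem.Set.add st.1 x, st.2 ++ [PySem.Set.len st.1])) (PySem.Set.ofList [], [])
  let right := bwd.2.reverse
  ((fwd.2.zip right).countP (fun p => p.1 == p.2) : Int)

-- ===== PRECONDITION & SPEC =====
def Spec_solution (topping : List Int) (out : Int) : Prop := out = solution_alt topping
instance (topping : List Int) (out : Int) : Decidable (Spec_solution topping out) := by unfold Spec_solution; infer_instance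

-- ===== CLAIM (what is proved, stated in full; the proofs are below) =====
def Claim_equal_solution : Prop := ∀ (topping : List Int), Dom_solution topping → Spec_solution topping (solution topping)

-- ===== LEMMAS AND PROOFS =====

-- the common value both programs compute: for each split index k, compare the number of distinct
-- elements of the prefix topping[:k+1] with that of the suffix topping[k+1:]
def specCount (topping : List Int) : Int :=
  ((List.range topping.length).countP (fun k =>
    (PySem.Set.ofList (topping.take (k + 1))).length == (PySem.Set.ofList (topping.drop (k + 1))).length) : Int)

-- two Nodup lists with the same members have the same length
theorem len_eq_of_mem_iff {u v : List Int} (hu : u.Nodup) (hv : v.Nodup)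
    (h : ∀ x, x ∈ u ↔ x ∈ v) : u.length = v.length :=
  ((List.perm_ext_iff_of_nodup hu hv).2 h).length_eq

-- Dict.erase facts (no erase lemmas ship in the PySem book)
theorem find?_filter_erase (items : List (Int × Int)) (k x : Int) :
    (items.filter (fun p => !(p.1 == k))).find? (fun p => p.1 == x) =
      if x = k then none else items.find? (fun p => p.1 == x) := by
  induction items with
  | nil => simp
  | cons p rest ih =>
    by_cases hpk : p.1 = k
    · have : ¬ (p.1 = x ∧ ¬ x = k) := by rintro ⟨h1, h2⟩; exact h2 (by rw [← h1, hpk])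
      by_cases hxk : x = k <;> simp_all
    · by_cases hpx : p.1 = x
      · have hxk : ¬ x = k := fun h => hpk (hpx.trans h)
        simp_all
      · simp_all

theorem getD_erase (d : PySem.Dict Int Int) (k x : Int) (v : Int) :
    (d.erase k).getD x v = if x = k then v else d.getD x v := by
  simp only [PySem.Dict.getD, PySem.Dict.get?, PySem.Dict.erase,
    find?_filter_erase d.items k x]
  split <;> rfl

theorem mem_keys_erase (d : PySem.Dict Int Int) (k x : Int) :
    x ∈ (d.erase k).keys ↔ x ∈ d.keys ∧ x ≠ k := by
  simp only [PySem.Dict.keys, PySem.Dict.erase]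
  constructor
  · intro h
    obtain ⟨p, hp, rfl⟩ := List.mem_map.1 h
    have := List.of_mem_filter hp
    exact ⟨List.mem_map_of_mem (List.mem_of_mem_filter hp), by simpa using this⟩
  · rintro ⟨h1, h2⟩
    obtain ⟨p, hp, rfl⟩ := List.mem_map.1 h1
    exact List.mem_map_of_mem (List.mem_filter.2 ⟨hp, by simpa using h2⟩)

theorem nodup_keys_erase (d : PySem.Dict Int Int) (k : Int) (h : d.keys.Nodup) :
    (d.erase k).keys.Nodup := by
  simp only [PySem.Dict.keys, PySem.Dict.erase] at *
  exact h.sublist (List.Sublist.map _ List.filter_sublist)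

theorem size_eq_keys_length (d : PySem.Dict Int Int) : d.size = d.keys.length := by
  simp [PySem.Dict.size, PySem.Dict.keys]

-- A's first loop builds Counter(topping): the `not in` branch inserts exactly what modify would
theorem firstLoop_eq_counter (topping : List Int) :
    topping.foldl (fun dic i =>
      if (PySem.Dict.contains dic i) = false then dic.insert i 1
      else dic.modify i 0 (· + 1)) PySem.Dict.empty = PySem.Dict.counter topping := by
  have hstep : (fun (dic : PySem.Dict Int Int) (i : Int) =>
      if (PySem.Dict.contains dic i) = false then dic.insert i 1
      else dic.modify i 0 (· + 1)) = (fun (dic : PySem.Dict Int Int) (i : Int) => dic.modify i 0 (· + 1)) := by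
    funext d i
    by_cases h : d.contains i = false
    · have hm : d.modify i 0 (· + 1) = d.insert i (d.getD i 0 + 1) := rfl
      rw [if_pos h, hm, PySem.Dict.getD_of_not_contains d 0 h]
      norm_num
    · rw [if_neg h]
  rw [hstep, PySem.Dict.counter_eq_foldl]

-- invariant for A's second loop: the set holds the prefix seen so far, the dict is the counter of
-- the not-yet-visited suffix (so its size is the suffix's distinct count)
theorem loopA (rest : List Int) : ∀ (s : PySem.Set Int) (d : PySem.Dict Int Int) (c : Int),
    (∀ x, d.getD x 0 = (rest.count x : Int)) → d.keys.Nodup → (∀ x, x ∈ d.keys ↔ x ∈ rest) →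
    (rest.foldl stepA (s, d, c)).2.2 =
    c + ((List.range rest.length).countP (fun k =>
      PySem.Set.len (PySem.Set.update s (rest.take (k + 1)))
        == ((PySem.Set.ofList (rest.drop (k + 1))).length : Int)) : Int) := by
  induction rest with
  | nil => intro s d c _ _ _; simp
  | cons i rest ih =>
    intro s d c hcount hnodup hmem
    have hikeys : i ∈ d.keys := (hmem i).2 (List.mem_cons_self)
    have hicontains : d.contains i = true := (PySem.Dict.contains_iff_mem_keys d i).2 hikeys
    set s' := PySem.Set.add s i with hs'
    set d1 := d.modify i 0 (· - 1) with hd1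
    set d2 := if d1.getD i 0 == 0 then d1.erase i else d1 with hd2
    set c' := if PySem.Set.len s' == (d2.size : Int) then c + 1 else c with hc'
    have hstep : ((i :: rest).foldl stepA (s, d, c)) = rest.foldl stepA (s', d2, c') := rfl
    have hd1get : ∀ x, d1.getD x 0 = if x = i then (d.getD i 0) - 1 else d.getD x 0 := by
      intro x; rw [hd1, PySem.Dict.getD_modify]
    have hd1i : d1.getD i 0 = (rest.count i : Int) := by
      rw [hd1get i, if_pos rfl, hcount i, List.count_cons_self]; push_cast; ring
    have hd1keys : d1.keys = d.keys := by
      rw [hd1, PySem.Dict.keys_modify, PySem.Dict.keys_insert_of_contains d _ hicontains]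
    have hgetne : ∀ x, x ≠ i → d1.getD x 0 = (rest.count x : Int) := by
      intro x hxi
      rw [hd1get x, if_neg hxi, hcount x, List.count_cons_of_ne (Ne.symm hxi)]
    have hinv : (∀ x, d2.getD x 0 = (rest.count x : Int)) ∧ d2.keys.Nodup ∧
        (∀ x, x ∈ d2.keys ↔ x ∈ rest) := by
      by_cases hz : rest.count i = 0
      · have he : d2 = d1.erase i := by
          rw [hd2, if_pos (by rw [hd1i, hz]; rfl)]
        have hnotmem : i ∉ rest := List.count_eq_zero.1 hz
        refine ⟨?_, ?_, ?_⟩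
        · intro x
          rw [he, getD_erase]
          by_cases hxi : x = i
          · subst hxi; rw [if_pos rfl, hz]; rfl
          · rw [if_neg hxi]; exact hgetne x hxi
        · rw [he]; exact nodup_keys_erase _ _ (hd1keys ▸ hnodup)
        · intro x
          rw [he, mem_keys_erase, hd1keys]
          constructor
          · rintro ⟨hk, hne⟩
            rcases (List.mem_cons.1 ((hmem x).1 hk)) with h | h
            · exact absurd h hne
            · exact h
          · intro hx
            exact ⟨(hmem x).2 (List.mem_cons_of_mem _ hx), fun hxe => hnotmem (hxe ▸ hx)⟩
      · have he : d2 = d1 := by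
          rw [hd2, if_neg (by rw [hd1i]; simpa using hz)]
        have hmemr : i ∈ rest := List.count_pos_iff.1 (Nat.pos_of_ne_zero hz)
        refine ⟨?_, ?_, ?_⟩
        · intro x
          by_cases hxi : x = i
          · subst hxi; rw [he]; exact hd1i
          · rw [he]; exact hgetne x hxi
        · rw [he, hd1keys]; exact hnodup
        · intro x
          rw [he, hd1keys]
          constructor
          · intro hk
            rcases List.mem_cons.1 ((hmem x).1 hk) with h | h
            · exact h ▸ hmemr
            · exact h
          · intro hx; exact (hmem x).2 (List.mem_cons_of_mem _ hx)
    obtain ⟨hcount2, hnodup2, hmem2⟩ := hinv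
    have hsize : (d2.size : Int) = ((PySem.Set.ofList rest).length : Int) := by
      have := len_eq_of_mem_iff hnodup2 (PySem.Set.nodup_ofList rest)
        (fun x => by rw [hmem2 x, PySem.Set.mem_ofList])
      rw [size_eq_keys_length, this]
    rw [hstep, ih s' d2 c' hcount2 hnodup2 hmem2]
    rw [hc', hsize]
    simp only [List.length_cons, List.range_succ_eq_map, List.countP_cons, List.countP_map]
    have hhead : (PySem.Set.len (PySem.Set.update s ((i :: rest).take (0 + 1)))
        == ((PySem.Set.ofList ((i :: rest).drop (0 + 1))).length : Int))
        = (PySem.Set.len s' == ((PySem.Set.ofList rest).length : Int)) := by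
      simp [PySem.Set.update_cons, PySem.Set.update_nil, hs']
    have htail : ∀ k, ((fun k => PySem.Set.len (PySem.Set.update s ((i :: rest).take (k + 1)))
          == ((PySem.Set.ofList ((i :: rest).drop (k + 1))).length : Int)) ∘ Nat.succ) k
        = (PySem.Set.len (PySem.Set.update s' (rest.take (k + 1)))
          == ((PySem.Set.ofList (rest.drop (k + 1))).length : Int)) := by
      intro k
      simp [Function.comp, PySem.Set.update_cons, hs', List.take_succ_cons]
    have hcp : ∀ k ∈ List.range rest.length, (((fun k => PySem.Set.len (PySem.Set.update s ((i :: rest).take (k + 1)))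
          == ((PySem.Set.ofList ((i :: rest).drop (k + 1))).length : Int)) ∘ Nat.succ) k = true) ↔
        ((PySem.Set.len (PySem.Set.update s' (rest.take (k + 1)))
          == ((PySem.Set.ofList (rest.drop (k + 1))).length : Int)) = true) := by
      intro k _; rw [htail k]
    rw [List.countP_congr hcp]
    rw [hhead]
    push_cast
    split_ifs with h
    · ring
    · ring

theorem solution_eq_spec (topping : List Int) : solution topping = specCount topping := by
  have h0 : solution topping = (topping.foldl stepA (PySem.Set.ofList [],
      topping.foldl (fun dic i =>
        if (PySem.Dict.contains dic i) = false then dic.insert i 1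
        else dic.modify i 0 (· + 1)) PySem.Dict.empty, 0)).2.2 := rfl
  rw [h0, firstLoop_eq_counter,
    loopA topping _ _ 0 (fun x => PySem.Dict.getD_counter topping x)
      (PySem.Dict.nodup_keys_counter topping)
      (fun x => by rw [PySem.Dict.keys_counter, PySem.Set.mem_ofList]),
    zero_add]
  unfold specCount
  congr 1
  apply List.countP_congr
  intro k _
  have hupd : PySem.Set.update (PySem.Set.ofList ([] : List Int)) (topping.take (k + 1))
      = PySem.Set.ofList (topping.take (k + 1)) := by
    rw [show PySem.Set.ofList ([] : List Int) = [] from rfl, PySem.Set.update_nil_left]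
  rw [hupd]
  simp [PySem.Set.len, Nat.cast_inj]

-- B's forward pass builds the prefix distinct-count list
theorem fwdLoop (xs : List Int) : ∀ (s : PySem.Set Int) (acc : List Int),
    (xs.foldl (fun (st : PySem.Set Int × List Int) x =>
      let s := PySem.Set.add st.1 x
      (s, st.2 ++ [PySem.Set.len s])) (s, acc)).2 =
    acc ++ (List.range xs.length).map (fun k => PySem.Set.len (PySem.Set.update s (xs.take (k + 1)))) := by
  induction xs with
  | nil => simp
  | cons x xs ih =>
    intro s acc
    simp only [List.foldl_cons, List.length_cons, List.range_succ_eq_map,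
      List.map_cons, List.map_map]
    rw [ih]
    simp [PySem.Set.update_cons, PySem.Set.update_nil, Function.comp, List.append_assoc,
      List.take_succ_cons]

-- B's reverse pass records each size BEFORE adding the current element
theorem bwdLoop (xs : List Int) : ∀ (s : PySem.Set Int) (acc : List Int),
    (xs.foldl (fun (st : PySem.Set Int × List Int) x =>
      (PySem.Set.add st.1 x, st.2 ++ [PySem.Set.len st.1])) (s, acc)).2 =
    acc ++ (List.range xs.length).map (fun k => PySem.Set.len (PySem.Set.update s (xs.take k))) := by
  induction xs with
  | nil => simp
  | cons x xs ih =>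
    intro s acc
    simp only [List.foldl_cons, List.length_cons, List.range_succ_eq_map,
      List.map_cons, List.map_map]
    rw [ih]
    simp [PySem.Set.update_cons, PySem.Set.update_nil, Function.comp, List.append_assoc,
      List.take_succ_cons]

theorem reverse_map_range {α : Type} (f : Nat → α) (n : Nat) :
    ((List.range n).map f).reverse = (List.range n).map (fun k => f (n - 1 - k)) := by
  apply List.ext_getElem
  · simp
  · intro i h1 h2
    simp [List.getElem_reverse, List.getElem_map, List.getElem_range]

theorem zip_map_countP {α : Type} (l : List Nat) (f g : Nat → α) (p : α × α → Bool) :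
    ((l.map f).zip (l.map g)).countP p = l.countP (fun k => p (f k, g k)) := by
  induction l with
  | nil => rfl
  | cons a l ih => simp [List.countP_cons, ih]

theorem solution_alt_eq_spec (topping : List Int) : solution_alt topping = specCount topping := by
  have h0 : solution_alt topping =
      (((topping.foldl (fun (st : PySem.Set Int × List Int) x =>
          let s := PySem.Set.add st.1 x
          (s, st.2 ++ [PySem.Set.len s])) (PySem.Set.ofList [], [])).2).zip
        ((topping.reverse.foldl (fun (st : PySem.Set Int × List Int) x =>
          (PySem.Set.add st.1 x, st.2 ++ [PySem.Set.len st.1])) (PySem.Set.ofList [], [])).2).reverse).countP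
        (fun p => p.1 == p.2) := rfl
  rw [h0, fwdLoop, bwdLoop, List.nil_append, List.nil_append, List.length_reverse,
    reverse_map_range, zip_map_countP]
  unfold specCount
  congr 1
  apply List.countP_congr
  intro k hk
  have hkn : k < topping.length := List.mem_range.1 hk
  have hupd : ∀ l : List Int, PySem.Set.update (PySem.Set.ofList ([] : List Int)) l
      = PySem.Set.ofList l := by
    intro l
    rw [show PySem.Set.ofList ([] : List Int) = [] from rfl, PySem.Set.update_nil_left]
  have htake : topping.reverse.take (topping.length - 1 - k)
      = (topping.drop (k + 1)).reverse := by
    have h1 : topping.length - (topping.length - 1 - k) = k + 1 := by omega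
    rw [List.take_reverse, h1]
  have hlen : (PySem.Set.ofList ((topping.drop (k + 1)).reverse)).length
      = (PySem.Set.ofList (topping.drop (k + 1))).length := by
    refine len_eq_of_mem_iff (PySem.Set.nodup_ofList _) (PySem.Set.nodup_ofList _) (fun x => ?_)
    rw [PySem.Set.mem_ofList, PySem.Set.mem_ofList, List.mem_reverse]
  simp only [hupd, htake]
  simp [PySem.Set.len, hlen, Nat.cast_inj]

-- ===== VERDICT (by name: the statement is the Claim_ definition above) =====
theorem solution_spec : Claim_equal_solution := by
  intro topping _
  unfold Spec_solution
  rw [solution_eq_spec, solution_alt_eq_spec]
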